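-- pv_equiv track=rewrite | github.com/qclib/qclib | qclib/gates/ucr.py | _search_separability
-- ===== SOURCE A (Python) =====
-- def _search_separability(idx_list, num_controls):
--     """
--     If `len(missing)>0`, the `multiplexor` is separable.
--     That is, it is possible to use `multiplexor` over a
--     reduced number of controls.
--     """
--     def list_missing(n, lists):
--         all_numbers = set(num for lst in lists for num in lst)
--         full_range = set(range(n))
--         missing = full_range - all_numbers
--         return sorted(missing)
--
--     missing = list_missing(num_controls, list(idx_list.values()))
--     return missing
-- ===== SOURCE B (Python) =====
-- def _search_separability(idx_list, num_controls):
--     """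
--     If `len(missing)>0`, the `multiplexor` is separable.
--     That is, it is possible to use `multiplexor` over a
--     reduced number of controls.
--     """
--     vals = sorted(num for lst in idx_list.values() for num in lst)
--     missing = []
--     j = 0
--     for i in range(num_controls):
--         while j < len(vals) and vals[j] < i:
--             j += 1
--         if not (j < len(vals) and vals[j] == i):
--             missing.append(i)
--     return missing
-- ===== Notes on version B (the rewrite author's own statement) =====
-- stated objective: alternative
-- what changed: Replaces A's hash-set comprehension + set difference + final sort by sorting the flattened indices first and then emitting the gaps with a single two-pointer merge scan of range(num_controls) against the sorted list, so no set is ever built and nothing is sorted at the end.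
import Mathlib
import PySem

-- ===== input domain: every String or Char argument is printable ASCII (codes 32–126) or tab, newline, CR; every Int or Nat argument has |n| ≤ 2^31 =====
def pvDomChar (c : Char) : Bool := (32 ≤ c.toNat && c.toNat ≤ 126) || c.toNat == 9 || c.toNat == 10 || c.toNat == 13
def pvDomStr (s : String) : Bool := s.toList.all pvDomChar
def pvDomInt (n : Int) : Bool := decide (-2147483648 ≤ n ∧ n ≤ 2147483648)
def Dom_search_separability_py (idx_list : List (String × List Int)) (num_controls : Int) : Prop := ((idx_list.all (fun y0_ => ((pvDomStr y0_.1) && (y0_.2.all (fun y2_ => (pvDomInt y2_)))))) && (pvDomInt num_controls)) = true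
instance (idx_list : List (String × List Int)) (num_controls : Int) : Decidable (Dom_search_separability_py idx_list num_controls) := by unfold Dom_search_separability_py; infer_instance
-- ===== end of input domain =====

-- B replaces A's set comprehension + set difference + sort-at-the-end by sorting the
-- flattened indices first and emitting the gaps by a two-pointer merge scan (objective: alternative).

-- ===== PORT A =====
-- A: all_numbers = set of every num in every list; missing = set(range(n)) - all_numbers; sorted(missing)
def search_separability_py (idx_list : List (String × List Int)) (num_controls : Int) : List Int :=
  let lists := idx_list.map (·.2)      -- list(idx_list.values())
  let all_numbers : PySem.Set Int := PySem.Set.ofList (lists.flatMap (fun lst => lst))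
  let full_range : PySem.Set Int := PySem.Set.ofList (PySem.List.pyRange 0 num_controls 1)
  let missing := PySem.Set.diff full_range all_numbers
  PySem.List.sorted missing (fun x => x)

-- ===== PORT B =====
-- the inner 'while j < len(vals) and vals[j] < i: j += 1' loop of B
def pvSkip (vals : List Int) (i : Int) (j : Nat) : Nat :=
  if h : j < vals.length then
    if vals[j] < i then pvSkip vals i (j + 1) else j
  else j
termination_by vals.length - j

-- B: vals = sorted of all numbers (with duplicates); for i in range(n): advance j past
-- vals[j] < i; append i to missing unless vals[j] == i.
def search_separability_py_alt (idx_list : List (String × List Int)) (num_controls : Int) : List Int :=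
  let vals := PySem.List.sorted (idx_list.flatMap (fun p => p.2)) (fun x => x)
  let res := (PySem.List.pyRange 0 num_controls 1).foldl
    (fun (st : Nat × List Int) i =>
      let j := pvSkip vals i st.1
      if j < vals.length ∧ vals.getD j 0 = i then (j, st.2) else (j, st.2 ++ [i]))
    (0, [])
  res.2

-- ===== PRECONDITION & SPEC =====
def Spec_search_separability_py (idx_list : List (String × List Int)) (num_controls : Int) (out : List Int) : Prop := out = search_separability_py_alt idx_list num_controls
instance (idx_list : List (String × List Int)) (num_controls : Int) (out : List Int) : Decidable (Spec_search_separability_py idx_list num_controls out) := by unfold Spec_search_separability_py; infer_instance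

-- ===== CLAIM (what is proved, stated in full; the proofs are below) =====
def Claim_equal_search_separability_py : Prop := ∀ (idx_list : List (String × List Int)) (num_controls : Int), Dom_search_separability_py idx_list num_controls → Spec_search_separability_py idx_list num_controls (search_separability_py idx_list num_controls)

-- ===== LEMMAS AND PROOFS =====

theorem pvSkip_ge (vals : List Int) (i : Int) (j : Nat) : j ≤ pvSkip vals i j := by
  unfold pvSkip
  split
  · split
    · exact le_trans (Nat.le_succ j) (pvSkip_ge vals i (j + 1))
    · exact le_refl j
  · exact le_refl j
termination_by vals.length - j

theorem pvSkip_le (vals : List Int) (i : Int) (j : Nat) (hj : j ≤ vals.length) :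
    pvSkip vals i j ≤ vals.length := by
  unfold pvSkip
  split
  · split
    · exact pvSkip_le vals i (j + 1) (by omega)
    · exact hj
  · exact hj
termination_by vals.length - j

theorem pvSkip_skipped (vals : List Int) (i : Int) (j : Nat) :
    ∀ k, j ≤ k → k < pvSkip vals i j → vals.getD k 0 < i := by
  intro k hk1 hk2
  unfold pvSkip at hk2
  split at hk2
  · next h =>
    split at hk2
    · next hlt =>
      by_cases hkj : k = j
      · subst hkj
        rwa [List.getD_eq_getElem?_getD, List.getElem?_eq_getElem h]
      · exact pvSkip_skipped vals i (j + 1) k (by omega) hk2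
    · omega
  · omega
termination_by vals.length - j

theorem pvSkip_stop (vals : List Int) (i : Int) (j : Nat)
    (h : pvSkip vals i j < vals.length) : i ≤ vals.getD (pvSkip vals i j) 0 := by
  by_cases hlen : j < vals.length
  · by_cases hlt : vals[j] < i
    · have e : pvSkip vals i j = pvSkip vals i (j + 1) := by rw [pvSkip]; simp [hlen, hlt]
      rw [e] at h ⊢
      exact pvSkip_stop vals i (j + 1) h
    · have e : pvSkip vals i j = j := by rw [pvSkip]; simp [hlen, hlt]
      rw [e, List.getD_eq_getElem?_getD, List.getElem?_eq_getElem hlen]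
      simpa using le_of_not_gt hlt
  · have e : pvSkip vals i j = j := by rw [pvSkip]; simp [hlen]
    rw [e] at h
    omega
termination_by vals.length - j

-- after the skip, "vals[j'] == i" decides membership of i in the sorted list vals
theorem pvSkip_mem (vals : List Int) (hs : vals.Pairwise (· ≤ ·)) (i : Int) (j : Nat)
    (hbelow : ∀ k, k < j → vals.getD k 0 < i) :
    ((pvSkip vals i j < vals.length ∧ vals.getD (pvSkip vals i j) 0 = i) ↔ i ∈ vals) := by
  constructor
  · rintro ⟨hlt, heq⟩
    rw [List.getD_eq_getElem?_getD, List.getElem?_eq_getElem hlt] at heq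
    simp only [Option.getD_some] at heq
    exact heq ▸ List.getElem_mem hlt
  · intro hmem
    obtain ⟨m, hm, hme⟩ := List.getElem_of_mem hmem
    have hbelow' : ∀ k, k < pvSkip vals i j → vals.getD k 0 < i := by
      intro k hk
      by_cases hkj : k < j
      · exact hbelow k hkj
      · exact pvSkip_skipped vals i j k (by omega) hk
    have hjm : pvSkip vals i j ≤ m := by
      by_contra hcon
      have := hbelow' m (by omega)
      rw [List.getD_eq_getElem?_getD, List.getElem?_eq_getElem hm] at this
      simp only [Option.getD_some] at this
      omega
    have hlt : pvSkip vals i j < vals.length := by omega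
    refine ⟨hlt, ?_⟩
    rw [List.getD_eq_getElem?_getD, List.getElem?_eq_getElem hlt]
    simp only [Option.getD_some]
    have hle : i ≤ vals[pvSkip vals i j] := by
      have hst := pvSkip_stop vals i j hlt
      rwa [List.getD_eq_getElem?_getD, List.getElem?_eq_getElem hlt, Option.getD_some] at hst
    rcases Nat.lt_or_ge (pvSkip vals i j) m with hc | hc
    · have hmono := (List.pairwise_iff_getElem.mp hs) (pvSkip vals i j) m hlt hm hc
      omega
    · have hem : m = pvSkip vals i j := by omega
      have h2 : vals[pvSkip vals i j] = vals[m] := by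
        have h3 := congrArg (fun k => vals.getD k 0) hem
        simpa [List.getD_eq_getElem?_getD, List.getElem?_eq_getElem hlt,
          List.getElem?_eq_getElem hm] using h3.symm
      rw [h2, hme]

-- the merge loop over a strictly increasing list of candidates is a filter by membership
theorem pv_loop_eq (vals : List Int) (hs : vals.Pairwise (· ≤ ·)) :
    ∀ (is_ : List Int), is_.Pairwise (· < ·) →
    ∀ (j : Nat) (acc : List Int), j ≤ vals.length →
    (∀ k, k < j → ∀ i ∈ is_, vals.getD k 0 < i) →
    (is_.foldl (fun (st : Nat × List Int) i =>
        let j := pvSkip vals i st.1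
        if j < vals.length ∧ vals.getD j 0 = i then (j, st.2) else (j, st.2 ++ [i]))
      (j, acc)).2 = acc ++ is_.filter (fun i => !(vals.contains i)) := by
  intro is_ hpw
  induction is_ with
  | nil => intro j acc _ _; simp
  | cons i is' ih =>
    intro j acc hj hbelow
    have hpw' := (List.pairwise_cons.mp hpw).2
    have hfst : ∀ i' ∈ is', i < i' := (List.pairwise_cons.mp hpw).1
    have hmemiff := pvSkip_mem vals hs i j (fun k hk => hbelow k hk i (List.mem_cons_self))
    have hj' : pvSkip vals i j ≤ vals.length := pvSkip_le vals i j hj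
    have hbelow' : ∀ k, k < pvSkip vals i j → ∀ i' ∈ is', vals.getD k 0 < i' := by
      intro k hk i' hi'
      have hlt := hfst i' hi'
      by_cases hkj : k < j
      · have := hbelow k hkj i (List.mem_cons_self); omega
      · have := pvSkip_skipped vals i j k (by omega) hk; omega
    rw [List.foldl_cons]
    simp only
    by_cases hc : pvSkip vals i j < vals.length ∧ vals.getD (pvSkip vals i j) 0 = i
    · have hmem : i ∈ vals := hmemiff.mp hc
      rw [if_pos hc, ih hpw' (pvSkip vals i j) acc hj' hbelow']
      simp [hmem]
    · have hmem : i ∉ vals := fun h => hc (hmemiff.mpr h)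
      rw [if_neg hc, ih hpw' (pvSkip vals i j) (acc ++ [i]) hj' hbelow']
      simp [hmem]

-- A's missing-set is the range filtered by "not among the flattened numbers",
-- already strictly increasing, so the final sort is the identity.
theorem pv_diff_eq_filter (idx_list : List (String × List Int)) (num_controls : Int) :
    PySem.Set.diff (PySem.Set.ofList (PySem.List.pyRange 0 num_controls 1))
        (PySem.Set.ofList ((idx_list.map (·.2)).flatMap (fun lst => lst)))
      = (PySem.List.pyRange 0 num_controls 1).filter
          (fun i => !(((idx_list.flatMap (·.2))).contains i)) := by
  rw [PySem.Set.ofList_eq_self_of_nodup _ (PySem.List.nodup_pyRange_one 0 num_controls)]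
  unfold PySem.Set.diff
  apply List.filter_congr
  intro i _
  rw [Bool.eq_iff_iff]
  simp [PySem.Set.mem_ofList, List.flatMap_def]

theorem search_separability_py_eq (idx_list : List (String × List Int)) (num_controls : Int) :
    search_separability_py idx_list num_controls
      = search_separability_py_alt idx_list num_controls := by
  unfold search_separability_py search_separability_py_alt
  simp only [pv_diff_eq_filter]
  rw [PySem.List.sorted_eq_self_of_pairwise _ _
    (((PySem.List.pairwise_lt_pyRange_one 0 num_controls).sublist
      List.filter_sublist).imp le_of_lt)]
  rw [pv_loop_eq (PySem.List.sorted (idx_list.flatMap (fun p => p.2)) (fun x => x))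
      (PySem.List.sorted_pairwise _ _)
      (PySem.List.pyRange 0 num_controls 1)
      (PySem.List.pairwise_lt_pyRange_one 0 num_controls)
      0 [] (Nat.zero_le _) (fun k hk => absurd hk (Nat.not_lt_zero k))]
  rw [List.nil_append]
  apply List.filter_congr
  intro i _
  rw [Bool.eq_iff_iff]
  simp [PySem.List.mem_sorted]

-- ===== VERDICT (by name: the statement is the Claim_ definition above) =====
theorem search_separability_py_spec : Claim_equal_search_separability_py := by
  intro idx_list num_controls _
  exact search_separability_py_eq idx_list num_controls
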